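/- GENERATED by mk_final_copies.py from the proof of the farm's unit `vorbis_decode_packet_rest.7` (farm:vorbis_decode_packet_rest.7.2: Proof.lean) as the
   re-elaboration sweep compiled it — do not edit. -/
import Asan.CheckWalk
import Vorbis.Spec.PacketRestFrame
import Vorbis.Spec.Units.vorbis_decode_packet_rest_7

/-
  UNIT vorbis_decode_packet_rest.7 — segment 7 of `vorbis_decode_packet_rest` (0x1112b5–0x1112d0; stb_vorbis_fixed.c 3309, 3225):
  the `error:` label of the floor loop and the latch of the channel loop. TWO entries:

      A  0x1112b5 (cut14, `At7a`)   movsxd rbx, r14d ; lea rdi, [rsp+rbx*4+0x280] ; call __asan_store4_noabort ;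
                                    mov dword [rsp+rbx*4+0x280], 1                   -- zero_channel[i] = TRUE
      B  0x1112d0 (cut15, `At7b`)   add r14d, 1                                      -- ++i
      exit 0x1112d4 (cut16, `At2` for `i + 1`): the head of the channel loop.

  Entry B changes no memory: STABLE is restated for a state with the same memory (`stable_of_mem_eq`). Entry A stores twice into
  the function's own stack area — the return address of the check call at `[steady rsp − 8]` and `zero_channel[i]` —: STABLE over
  these stores is `stable_frame_store` (slots by `u_frame`, the invariant by `DecodeInv.carry` with `AllKept`: no allocated block
  meets the stack region, no shadow byte is written). The check site 0x1112c0: `zero_channel` is an object of the function's own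
  protected frame (`zero_channel_obj`, `Vorbis.check_small`); `i < C ≤ 16` (HD1).
-/

open X86 X86.User Asan Vorbis Vorbis.Spec Vorbis.Spec.vorbis_decode_packet_rest

set_option maxRecDepth 4000
set_option maxHeartbeats 4000000

namespace Vorbis.Spec.vorbis_decode_packet_rest_7

/-! ### Bit-level facts about a channel index `i < 16` -/

/-- `add r14d, 1` of a channel index (`i < 16`), zero-extended into r14: `i + 1`. A closed fact, checked for the sixteen values. -/
theorem inc_r14 (i : Nat) (hi : i < 16) :
    Word.ofBV (Word.part Width.w32 (UInt64.ofNat i) + 1#32) = UInt64.ofNat (i + 1) := by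
  have h : ∀ j : Fin 16, Word.ofBV (Word.part Width.w32 (UInt64.ofNat j.val) + 1#32) = UInt64.ofNat (j.val + 1) := by
    decide
  exact h ⟨i, hi⟩

/-- `movsxd rbx, r14d` of a channel index (`i < 16`): the index itself. A closed fact, checked for the sixteen values. -/
theorem sext_idx (i : Nat) (hi : i < 16) :
    Word.ofBV (BitVec.signExtend 64 (Word.part Width.w32 (UInt64.ofNat i))) = UInt64.ofNat i := by
  have h : ∀ j : Fin 16, Word.ofBV (BitVec.signExtend 64 (Word.part Width.w32 (UInt64.ofNat j.val))) = UInt64.ofNat j.val := by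
    decide
  exact h ⟨i, hi⟩

/-! ### The frame object `zero_channel` -/

/-- `zero_channel[256]` (1024 bytes at offset 512 of the frame whose base is `entry rsp − 2872`, i.e. at `steady rsp + 0x280`)
is a live object inside the function: the third object of its own protected frame, which `framesIn` puts in front. -/
theorem zero_channel_obj (others : List Obj) (frames : List (Nat × FrameLayout)) (u : State) :
    (⟨(u.reg .rsp).toNat - 2872 + 512, 1024, .stack⟩ : Obj) ∈ stackObjs (framesIn frames u) ++ others := by
  unfold framesIn
  rw [stackObjs_cons]
  apply List.mem_append_left
  apply List.mem_append_left
  exact List.mem_cons_of_mem _ (List.mem_cons_of_mem _ List.mem_cons_self)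

/-! ### STABLE at a state with the same memory (entry B) -/

/-- STABLE speaks of the memory, `rsp`, DF and MXCSR only: a state with the same memory, the same `rsp` and the ABI's invariant
satisfies it again (entry B: `add r14d, 1` writes a register and the status flags). -/
theorem stable_of_mem_eq {u₀ : State} {others : List Obj} {frames : List (Nat × FrameLayout)} {len : Nat} {Ar : Arena}
    {stored room : Int} {mode : Nat} {ysz : Nat → Nat} {u : State} {ret : Word} {ls : Int} {v s : State}
    (h : Stable u₀ others frames len Ar stored room mode ysz u ret ls v)
    (hm : s.mem = v.mem) (hrsp : s.reg .rsp = v.reg .rsp) (habi : abiInv s) :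
    Stable u₀ others frames len Ar stored room mode ysz u ret ls s := by
  obtain ⟨⟨h1, h2, h3, h4, h5, h6, h7, h8, h9, h10, h11, h12, h13, h14, h15⟩, g1, g2, g3, g4, g5, g6, g7, g8, g9, g10, g11⟩ := h
  simp only [slot64, slot32] at g1 g2 g3 g4 g5 g6 g7 g8
  rw [← hm] at h4 h6 h7 h8 h9 h10 h11 h12 h13 h14 h15 g1 g2 g3 g4 g5 g6 g7 g8 g9 g10 g11
  exact ⟨⟨h1, h2, hrsp.trans h3, h4, habi, h6, h7, h8, h9, h10, h11, h12, h13, h14, h15⟩,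
    g1, g2, g3, g4, g5, g6, g7, g8, g9, g10, g11⟩

/-! ### STABLE over the two stores of entry A -/

/-- **What STABLE and the loop head read of `*f` survives when `*f` is kept**: the channel count, `n = blocksize[m->blockflag]`
and `map = &f->mapping[m->mapping]`, for the record `m` of a mode `mode < 64` (MD1). -/
theorem config_reads_kept {mem mem' : Mem} {f m mode : Nat} (hk : (objBlock f).Kept mem mem')
    (hm : m = stb_vorbis.mode_config_at f mode) (hmode : mode < 64) :
    stb_vorbis.channels mem' f = stb_vorbis.channels mem f ∧ nOf mem' f m = nOf mem f m ∧
      mapOf mem' f m = mapOf mem f m := by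
  simp only [vacc, voff] at hm
  have e0 : stb_vorbis.blocksize_0 mem' f = stb_vorbis.blocksize_0 mem f :=
    hk.i32 (f + 152) (by simp only [vblock]; omega) (by simp only [vblock, voff]; omega)
  have e1 : stb_vorbis.blocksize_1 mem' f = stb_vorbis.blocksize_1 mem f :=
    hk.i32 (f + 156) (by simp only [vblock]; omega) (by simp only [vblock, voff]; omega)
  have e2 : Mode.blockflag mem' m = Mode.blockflag mem m :=
    hk.u8 (m + 0) (by simp only [vblock]; omega) (by simp only [vblock, voff]; omega)
  have e3 : Mode.mapping mem' m = Mode.mapping mem m :=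
    hk.u8 (m + 1) (by simp only [vblock]; omega) (by simp only [vblock, voff]; omega)
  have e4 : stb_vorbis.mapping mem' f = stb_vorbis.mapping mem f :=
    hk.ptr (f + 472) (by simp only [vblock]; omega) (by simp only [vblock, voff]; omega)
  refine ⟨?_, ?_, ?_⟩
  · exact hk.i32 (f + 4) (by simp only [vblock]; omega) (by simp only [vblock, voff]; omega)
  · unfold nOf
    rw [e2]
    exact bsize_congr e0 e1 _
  · unfold mapOf stb_vorbis.mapping_at
    rw [e3, e4]

/-- **STABLE over the stores of entry A**: the return address of the check call (`[steady rsp − 8]`) and the dword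
`zero_channel[i]` (`[steady rsp + 0x280 + 4·i]`, `i < 16`). Both lie in the function's own stack area, off every slot STABLE
names, off every allocated block and off the shadow. -/
theorem stable_frame_store {u₀ : State} {others : List Obj} {frames : List (Nat × FrameLayout)} {len : Nat} {Ar : Arena}
    {stored room : Int} {mode : Nat} {ysz : Nat → Nat} {u : State} {ret : Word} {ls : Int} {v s : State}
    (h : Stable u₀ others frames len Ar stored room mode ysz u ret ls v)
    (he_room : 7340032 + 3856 ≤ (u.reg .rsp).toNat) (he_top : (u.reg .rsp).toNat + 8 ≤ 8388608)
    (i : Nat) (hi16 : i < 16) (x y : Nat)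
    (w_mem : s.mem = (v.mem.writeLE (u.reg .rsp - 3008) 8 x).writeLE (u.reg .rsp - 3000 + UInt64.ofNat i * 4 + 640) 4 y)
    (w_rsp : s.reg .rsp = u.reg .rsp - 3000) (habi : abiInv s) (w_eq : CodeOK u₀ s.mem) :
    Stable u₀ others frames len Ar stored room mode ysz u ret ls s ∧
      stb_vorbis.channels s.mem (fOf u) = stb_vorbis.channels v.mem (fOf u) ∧
      mapOf s.mem (fOf u) (mOf u) = mapOf v.mem (fOf u) (mOf u) := by
  obtain ⟨⟨h1, h2, h3, h4, h5, h6, h7, h8, h9, h10, h11, h12, h13, h14, h15⟩, g1, g2, g3, g4, g5, g6, g7, g8, g9, g10, g11⟩ := h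
  simp only [slot64, slot32, spOf] at g1 g2 g3 g4 g5 g6 g7 g8
  -- the return address and the six saved registers
  have t0 : UInt64.ofNat (s.mem.readLE (u.reg .rsp) 8) = ret := by u_frame h7
  have t1 : UInt64.ofNat (s.mem.readLE (u.reg .rsp - 8) 8) = u.reg .r15 := by u_frame h8
  have t2 : UInt64.ofNat (s.mem.readLE (u.reg .rsp - 16) 8) = u.reg .r14 := by u_frame h9
  have t3 : UInt64.ofNat (s.mem.readLE (u.reg .rsp - 24) 8) = u.reg .r13 := by u_frame h10
  have t4 : UInt64.ofNat (s.mem.readLE (u.reg .rsp - 32) 8) = u.reg .r12 := by u_frame h11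
  have t5 : UInt64.ofNat (s.mem.readLE (u.reg .rsp - 40) 8) = u.reg .rbp := by u_frame h12
  have t6 : UInt64.ofNat (s.mem.readLE (u.reg .rsp - 48) 8) = u.reg .rbx := by u_frame h13
  -- the spill slots and the two stack arguments
  have q1 : s.mem.readLE (u.reg .rsp - 3000 + 64) 8 = fOf u := by u_frame g1
  have q2 : s.mem.readLE (u.reg .rsp - 3000 + 104) 8 = lenOf u := by u_frame g2
  have q3 : s.mem.readLE (u.reg .rsp - 3000 + 112) 8 = mOf u := by u_frame g3
  have q4 : s.mem.readLE (u.reg .rsp - 3000 + 120) 4 = v.mem.readLE (u.reg .rsp - 3000 + 120) 4 := by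
    u_frame (rfl : v.mem.readLE (u.reg .rsp - 3000 + 120) 4 = _)
  have q5 : s.mem.readLE (u.reg .rsp - 3000 + 124) 4 = v.mem.readLE (u.reg .rsp - 3000 + 124) 4 := by
    u_frame (rfl : v.mem.readLE (u.reg .rsp - 3000 + 124) 4 = _)
  have q6 : s.mem.readLE (u.reg .rsp - 3000 + 80) 4 = nOf v.mem (fOf u) (mOf u) := by u_frame g6
  have q7 : s.mem.readLE (u.reg .rsp - 3000 + 60) 4 = nOf v.mem (fOf u) (mOf u) / 2 := by u_frame g7
  have q8 : s.mem.readLE (u.reg .rsp - 3000 + 96) 8 = sbOf u := by u_frame g8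
  have q9 : s.mem.readLE (u.reg .rsp + 8) 4 = v.mem.readLE (u.reg .rsp + 8) 4 := by
    u_frame (rfl : v.mem.readLE (u.reg .rsp + 8) 4 = _)
  have q10 : s.mem.readLE (u.reg .rsp + 16) 8 = pLeftOf u := by u_frame g10
  -- the footprint of the two stores: the function's own stack area
  have hown : Mem.SameExcept [⟨(u.reg .rsp).toNat - 3856, (u.reg .rsp).toNat⟩] v.mem s.mem := by
    u_same
  have hun : ShadowUntouched v.mem s.mem := by v_untouched
  -- no allocated block meets the stack region
  have hk : AllKept (RunBlk Ar len) v.mem s.mem := by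
    apply AllKept.of_sameExcept h15.ok hown
    intro B hB w hw
    have hoff := h15.offStack B hB
    have e1 : w = ⟨(u.reg .rsp).toNat - 3856, (u.reg .rsp).toNat⟩ := List.mem_singleton.mp hw
    subst e1
    simp only
    omega
  have hsh' : ShadowInv others (framesIn frames u) (spOf u).toNat s.mem := h14.untouched hun
  have hinv' : DecodeInv others (framesIn frames u) len Ar stored room ysz s.mem (fOf u) :=
    h15.carry h14 hk hsh'
  -- what STABLE reads of `*f`
  obtain ⟨hsh, hinv0, hargs⟩ := h2
  have hmode : mode < 64 := by
    have := hinv0.fb.vorbis.mode.MD1.2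
    have := hargs.mode_lt
    omega
  obtain ⟨ech, en, emap⟩ := config_reads_kept (hk _ h15.ob1) hargs.m_eq hmode
  -- `*p_left`: an object of a caller's frame, above the function's stack area
  have hleft : s.mem.i32 (pLeftOf u) = v.mem.i32 (pLeftOf u) := by
    obtain ⟨hl, hl1, hl2⟩ := hargs.left_obj
    have hw := hl.where_ hsh.inv hsh.offText (by omega)
    have ea : (addr (pLeftOf u)).toNat = pLeftOf u := toNat_addr _ (by omega)
    unfold Mem.i32 Mem.u32
    rw [hown.readLE (addr (pLeftOf u)) 4 (by omega) ?_]
    intro w hw'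
    have e1 : w = ⟨(u.reg .rsp).toNat - 3856, (u.reg .rsp).toNat⟩ := List.mem_singleton.mp hw'
    subst e1
    simp only
    omega
  -- the function's footprint so far
  have hsame : Mem.SameExcept ((vorbis_decode_packet_rest.spec others frames len Ar stored room mode ysz).footprint u)
      u.mem s.mem := by
    refine h6.step_same hown ?_
    intro w hw a a1 a2
    have e1 : w = ⟨(u.reg .rsp).toNat - 3856, (u.reg .rsp).toNat⟩ := List.mem_singleton.mp hw
    subst e1
    exact covered_footprint others frames len Ar stored room mode ysz u a (Or.inl ⟨a1, a2⟩)
  rw [← q4] at g4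
  rw [← q5] at g5
  rw [← q9] at g9
  rw [← en] at q6 q7
  rw [← hleft] at g11
  exact ⟨⟨⟨h1, ⟨hsh, hinv0, hargs⟩, w_rsp, w_eq, habi, hsame, t0, t1, t2, t3, t4, t5, t6, hsh', hinv'⟩,
    q1, q2, q3, g4, g5, q6, q7, q8, g9, q10, g11⟩, ech, emap⟩

/-! ### The two entries -/

/-- **Entry B, 0x1112d0** (from segment .6): `add r14d, 1`, then the head of the channel loop 0x1112d4 with `i + 1`. -/
theorem entryB (Lay : Layout) (μ : Microarch) (hμ : UserX.MicroOK μ) (u₀ : State)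
    (hcode : HasCodeNat Lay u₀ Vorbis.L.vorbis_decode_packet_rest.entry Vorbis.Code.code_vorbis_decode_packet_rest.nat
      Vorbis.L.vorbis_decode_packet_rest.size)
    (others : List Obj) (frames : List (Nat × FrameLayout)) (len : Nat) (Ar : Arena) (stored room : Int)
    (mode : Nat) (ysz : Nat → Nat) (u : State) (ret : Word) (i : Nat) (v : State)
    (hat : At7b u₀ others frames len Ar stored room mode ysz u ret i v) :
    ReachVia Lay μ Vorbis.WayInv v (fun w => At2 u₀ others frames len Ar stored room mode ysz u ret (i + 1) w) := by
  -- the present state under the names the walker reads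
  have w_rip := hat.rip
  have hr14 := hat.r14
  have w_eq : Mem.EqOn Vorbis.L.textLo Vorbis.L.textHi u₀.mem v.mem := hat.code
  have hdf : v.flags .df = false := (show abiInv _ from hat.abi).1
  have hmx : v.mxcsr &&& 0x1F80 = 0x1F80 := (show abiInv _ from hat.abi).2
  have hsse := Vorbis.sseOK_of_abiInv hat.abi
  -- HD1: at most 16 channels
  have hC16 : stb_vorbis.channels v.mem (fOf u) ≤ 16 := hat.inv.config.header.HD1.2
  have hi := hat.i_lt
  have hvendor := hμ.vendor
  -- 0x1112d0: add r14d, 1 (line 3225)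
  u_walk hcode [hvendor] until [Vorbis.L.vorbis_decode_packet_rest.cut16] span [Vorbis.L.textLo, Vorbis.L.textHi] side (v_side)
  -- 0x1112d4 (cut16): the exit assertion `At2 … (i + 1)`
  refine ReachVia.done ?_
  have habi : abiInv s_1112d0 := by v_inv
  have hst := stable_of_mem_eq hat.toStable w_mem (w_kept .rsp rfl) habi
  refine ⟨hst, w_rip, ?_, ?_, ?_⟩
  · rw [w_r14]
    exact inc_r14 i (by omega)
  · rw [w_mem]
    omega
  · rw [w_mem, w_kept .r13 rfl]
    exact hat.r13

/-- **Entry A, 0x1112b5** (the `error:` label, from segments .2 and .5): `zero_channel[i] = TRUE` (line 3309: one check site,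
one store into the own frame), `add r14d, 1`, then the head of the channel loop 0x1112d4 with `i + 1`. -/
theorem entryA (Lay : Layout) (hLay : Lay.hi = 0x1000000) (μ : Microarch) (hμ : UserX.MicroOK μ) (u₀ : State)
    (hcode : HasCodeNat Lay u₀ Vorbis.L.vorbis_decode_packet_rest.entry Vorbis.Code.code_vorbis_decode_packet_rest.nat
      Vorbis.L.vorbis_decode_packet_rest.size)
    (hstore4 : Asan.SmallCheck Lay μ Vorbis.WayInv (Vorbis.CodeOK u₀) [.rax, .rcx, .rdx] 4
      Vorbis.L.__asan_store4_noabort.entry)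
    (others : List Obj) (frames : List (Nat × FrameLayout)) (len : Nat) (Ar : Arena) (stored room : Int)
    (mode : Nat) (ysz : Nat → Nat) (u : State) (ret : Word) (i : Nat) (v : State)
    (hat : At7a u₀ others frames len Ar stored room mode ysz u ret i v) :
    ReachVia Lay μ Vorbis.WayInv v (fun w => At2 u₀ others frames len Ar stored room mode ysz u ret (i + 1) w) := by
  -- the entry state's facts: the stack room (he_room, he_top, he_stack)
  have he := hat.entry
  v_entry he
  -- the present state under the names the walker reads (NOT `w_…`: the walker clears those of the previous state)
  have w_rip := hat.rip
  have hrsp : v.reg .rsp = u.reg .rsp - 3000 := hat.rsp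
  have hr14 := hat.r14
  have w_eq : Mem.EqOn Vorbis.L.textLo Vorbis.L.textHi u₀.mem v.mem := hat.code
  have hdf : v.flags .df = false := (show abiInv _ from hat.abi).1
  have hmx : v.mxcsr &&& 0x1F80 = 0x1F80 := (show abiInv _ from hat.abi).2
  have hsse := Vorbis.sseOK_of_abiInv hat.abi
  -- HD1: at most 16 channels, so `i < 16`
  have hC16 : stb_vorbis.channels v.mem (fOf u) ≤ 16 := hat.inv.config.header.HD1.2
  have hi := hat.i_lt
  have hi16 : i < 16 := by omega
  -- 0x1112b5 … 0x1112d0 (lines 3309, 3225)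
  u_walk hcode [hμ.vendor] until [Vorbis.L.vorbis_decode_packet_rest.cut16] span [Vorbis.L.textLo, Vorbis.L.textHi] side (v_side)
  · -- 0x1112c0: the check of the store to `zero_channel[i]`, an object of the function's own frame
    have hun : ShadowUntouched v.mem s_1112c0.mem := by v_untouched
    rw [sext_idx i hi16]
    refine Vorbis.check_small hat.shadow hun (zero_channel_obj others frames u) (by decide) ?_ ?_
    · show (u.reg .rsp).toNat - 2872 + 512 ≤ _
      u_omega
    · show _ ≤ (u.reg .rsp).toNat - 2872 + 512 + 1024
      u_omega
  · -- 0x1112c5: the store misses the image's text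
    rw [sext_idx i hi16]
    u_omega
  · -- 0x1112d4 (cut16): the exit assertion `At2 … (i + 1)`
    rw [sext_idx i hi16] at w_mem
    refine ReachVia.done ?_
    have habi : abiInv s_1112d0 := by v_inv
    obtain ⟨hst, ech, emap⟩ := stable_frame_store hat.toStable he_room he_top i hi16 _ _ w_mem w_rsp habi w_eq
    refine ⟨hst, w_rip, ?_, ?_, ?_⟩
    · rw [w_r14]
      exact inc_r14 i hi16
    · rw [ech]
      omega
    · rw [emap, w_kept .r13 rfl]
      exact hat.r13

end Vorbis.Spec.vorbis_decode_packet_rest_7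

/-- Segment 7 of `vorbis_decode_packet_rest` (0x1112b5–0x1112d0): from either entry assertion (`At7a`: `zero_channel[i] = TRUE`
first; `At7b`: `++i` only) to the head of the channel loop, `At2` for `i + 1`. -/
theorem Vorbis.Spec.Worked.vorbis_decode_packet_rest_7_ok : Vorbis.Spec.vorbis_decode_packet_rest_7.Statement := by
  unfold Vorbis.Spec.vorbis_decode_packet_rest_7.Statement
  intro Lay hLay μ hμ u₀ hcode hstore4
  intro others frames len Ar stored room mode ysz u ret i v hat
  rcases hat with ha | hb
  · exact Vorbis.Spec.vorbis_decode_packet_rest_7.entryA Lay hLay μ hμ u₀ hcode hstore4 others frames len Ar stored room mode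
      ysz u ret i v ha
  · exact Vorbis.Spec.vorbis_decode_packet_rest_7.entryB Lay μ hμ u₀ hcode others frames len Ar stored room mode ysz u ret i v hb
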